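-- pv_equiv track=rewrite | github.com/Patrycja1311/Codewars | kata_7kyu/pair_zeros/pair_zeros.py | pair_zeros
-- ===== SOURCE A (Python) =====
-- def pair_zeros(arr):
--     result, zero_count = [], 0
--     for num in arr:
--         if num == 0:
--             zero_count += 1
--             if zero_count % 2:
--                 result.append(num)
--         else:
--             result.append(num)
--     return result
-- ===== SOURCE B (Python) =====
-- def pair_zeros(arr):
--     zeros = [i for i, x in enumerate(arr) if x == 0]
--     drop = {z for k, z in enumerate(zeros) if k % 2 == 1}
--     return [x for i, x in enumerate(arr) if i not in drop]
-- ===== Notes on version B (the rewrite author's own statement) =====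
-- stated objective: alternative
-- what changed: Replaces A's single pass with a running zero-parity counter by a two-pass index-table scheme: first collect the indices of all zeros, build a drop-set of the odd-rank (2nd, 4th, ...) zero indices, then filter the array by original index.
import Mathlib
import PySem

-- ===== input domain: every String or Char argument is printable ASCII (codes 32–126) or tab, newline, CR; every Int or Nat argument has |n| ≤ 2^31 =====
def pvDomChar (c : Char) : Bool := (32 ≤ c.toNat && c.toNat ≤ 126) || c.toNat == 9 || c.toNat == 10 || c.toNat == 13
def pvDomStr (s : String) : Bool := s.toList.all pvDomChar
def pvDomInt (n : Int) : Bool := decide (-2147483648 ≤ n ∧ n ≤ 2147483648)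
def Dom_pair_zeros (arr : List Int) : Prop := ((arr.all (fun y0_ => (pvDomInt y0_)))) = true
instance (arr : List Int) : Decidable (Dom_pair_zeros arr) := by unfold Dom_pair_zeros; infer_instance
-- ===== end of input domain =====

-- B replaces A's single pass with a running zero-parity counter by a two-pass
-- index-table scheme (collect zero indices, drop-set of odd-rank zeros, filter by
-- index); objective: alternative decomposition, same asymptotic cost.

-- ===== PORT A =====
def pair_zeros (arr : List Int) : List Int :=
  (arr.foldl
    (fun (s : List Int × Int) num =>
      if num == 0 then
        let zero_count := s.2 + 1
        if PySem.Int.mod zero_count 2 ≠ 0 then (s.1 ++ [num], zero_count)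
        else (s.1, zero_count)
      else (s.1 ++ [num], s.2))
    ([], 0)).1

-- ===== PORT B =====
def pair_zeros_alt (arr : List Int) : List Int :=
  let zeros : List Int :=
    ((PySem.List.enumerate arr).filter (fun p => p.2 == 0)).map (fun p => p.1)
  let drop : PySem.Set Int :=
    PySem.Set.ofList
      (((PySem.List.enumerate zeros).filter (fun p => PySem.Int.mod p.1 2 == 1)).map
        (fun p => p.2))
  ((PySem.List.enumerate arr).filter (fun p => !(PySem.Set.contains drop p.1))).map
    (fun p => p.2)

-- ===== PRECONDITION & SPEC =====
def Spec_pair_zeros (arr : List Int) (out : List Int) : Prop := out = pair_zeros_alt arr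
instance (arr : List Int) (out : List Int) : Decidable (Spec_pair_zeros arr out) := by unfold Spec_pair_zeros; infer_instance

-- ===== CLAIM (what is proved, stated in full; the proofs are below) =====
def Claim_equal_pair_zeros : Prop := ∀ (arr : List Int), Dom_pair_zeros arr → Spec_pair_zeros arr (pair_zeros arr)

-- ===== LEMMAS AND PROOFS =====

/-- The common result: keep every non-zero; keep a zero exactly when the flag is
true, flipping the flag at each zero (`true` = the next zero is kept). -/
def pvPZ : List Int → Bool → List Int
  | [], _ => []
  | x :: t, b =>
    if x = 0 then (if b then x :: pvPZ t false else pvPZ t true)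
    else x :: pvPZ t b

/-- Elements of `l` at odd absolute positions when `b = false` (the flag says
whether the head's position is odd). -/
def pvPick : List Int → Bool → List Int
  | [], _ => []
  | a :: l, b => if b then a :: pvPick l false else pvPick l true

/-- Indices (from offset `s`) of the zeros of `t`. -/
def pvZ (t : List Int) (s : Int) : List Int :=
  ((PySem.List.enumerate t s).filter (fun p => p.2 == 0)).map (fun p => p.1)

theorem pvZ_cons (x : Int) (t : List Int) (s : Int) :
    pvZ (x :: t) s = if x = 0 then s :: pvZ t (s + 1) else pvZ t (s + 1) := by
  by_cases h : x = 0 <;>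
    simp [pvZ, PySem.List.enumerate_cons, h]

theorem pvZ_ge (t : List Int) (s i : Int) (h : i ∈ pvZ t s) : s ≤ i := by
  simp only [pvZ, List.mem_map, List.mem_filter] at h
  obtain ⟨p, ⟨hp, -⟩, rfl⟩ := h
  rw [PySem.List.mem_enumerate_iff] at hp
  obtain ⟨k, -, rfl⟩ := hp
  simp

theorem pvPick_subset (l : List Int) (b : Bool) (i : Int) (h : i ∈ pvPick l b) :
    i ∈ l := by
  induction l generalizing b with
  | nil => simp [pvPick] at h
  | cons a l ih =>
    cases b <;> simp only [pvPick] at h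
    · exact List.mem_cons_of_mem a (ih _ h)
    · simp only [if_pos, List.mem_cons] at h
      rcases h with rfl | h
      · exact List.mem_cons_self
      · exact List.mem_cons_of_mem a (ih _ h)

/-- Parity of `mod` by 2 flips on +1 (for the `== 1` test). -/
theorem pvMod_flip (s : Int) :
    (PySem.Int.mod (s + 1) 2 == 1) = !(PySem.Int.mod s 2 == 1) := by
  rw [PySem.Int.mod_eq_emod_of_pos (by norm_num),
      PySem.Int.mod_eq_emod_of_pos (by norm_num)]
  rcases Int.emod_two_eq_zero_or_one s with h | h
  · have h1 : (s + 1) % 2 = 1 := by omega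
    rw [h, h1]; decide
  · have h1 : (s + 1) % 2 = 0 := by omega
    rw [h, h1]; decide

/-- Parity of `mod` by 2 flips on +1 (for the `== 0` test). -/
theorem pvMod_flip0 (s : Int) :
    (PySem.Int.mod (s + 1) 2 == 0) = !(PySem.Int.mod s 2 == 0) := by
  rw [PySem.Int.mod_eq_emod_of_pos (by norm_num),
      PySem.Int.mod_eq_emod_of_pos (by norm_num)]
  rcases Int.emod_two_eq_zero_or_one s with h | h
  · have h1 : (s + 1) % 2 = 1 := by omega
    rw [h, h1]; decide
  · have h1 : (s + 1) % 2 = 0 := by omega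
    rw [h, h1]; decide

/-- B's drop-set comprehension is `pvPick`. -/
theorem pvPick_enum (l : List Int) (s : Int) :
    ((PySem.List.enumerate l s).filter (fun p => PySem.Int.mod p.1 2 == 1)).map
        (fun p => p.2) =
      pvPick l (PySem.Int.mod s 2 == 1) := by
  induction l generalizing s with
  | nil => rfl
  | cons a l ih =>
    rw [PySem.List.enumerate_cons, List.filter_cons]
    have hflip := pvMod_flip s
    cases hb : (PySem.Int.mod s 2 == 1) with
    | true =>
      rw [hb] at hflip
      rw [if_pos rfl, List.map_cons, ih (s + 1), hflip]
      rfl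
    | false =>
      rw [hb] at hflip
      rw [if_neg (by simp), ih (s + 1), hflip]
      rfl

/-- Membership test against a `Set.ofList` is the list `contains`. -/
theorem pvContains_ofList (l : List Int) (i : Int) :
    PySem.Set.contains (PySem.Set.ofList l) i = l.contains i := by
  simp only [PySem.Set.contains]
  by_cases h : i ∈ l
  · simp [List.contains_eq_mem, (PySem.Set.mem_ofList l i).mpr h, h]
  · simp [List.contains_eq_mem, h, PySem.Set.mem_ofList]


/-- Main B-side invariant: filtering `t` (enumerated from `s`) against the
drop-list `pvPick (pvZ t s) b` computes `pvPZ t (!b)`. -/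
theorem pvB_main (t : List Int) (s : Int) (b : Bool) :
    ((PySem.List.enumerate t s).filter
        (fun p => !((pvPick (pvZ t s) b).contains p.1))).map (fun p => p.2) =
      pvPZ t (!b) := by
  induction t generalizing s b with
  | nil => rfl
  | cons x t ih =>
    have hge : ∀ i ∈ pvPick (pvZ t (s + 1)) b, s + 1 ≤ i := fun i hi =>
      pvZ_ge t (s + 1) i (pvPick_subset _ _ _ hi)
    have htail : ∀ (b' : Bool) (d : List Int),
        (∀ p ∈ PySem.List.enumerate t (s + 1),
          (!(d.contains p.1)) = (!((pvPick (pvZ t (s + 1)) b').contains p.1))) →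
        ((PySem.List.enumerate t (s + 1)).filter
            (fun p => !(d.contains p.1))).map (fun p => p.2) = pvPZ t (!b') := by
      intro b' d hcong
      rw [List.filter_congr hcong]
      exact ih (s + 1) b'
    rw [PySem.List.enumerate_cons, pvZ_cons, List.filter_cons]
    by_cases hx : x = 0
    · rw [if_pos hx]
      cases b with
      | false =>
        -- pvPick (s :: zs) false = pvPick zs true; head index s not in it
        have hnot : ¬ s ∈ pvPick (pvZ t (s + 1)) true := fun hc => by
          have := pvZ_ge t (s + 1) s (pvPick_subset _ _ _ hc); omega
        simp only [pvPick, if_neg (by simp : ¬ (false = true))]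
        have hhead : (!((pvPick (pvZ t (s + 1)) true).contains s)) = true := by
          simp [List.contains_eq_mem, hnot]
        rw [if_pos hhead, List.map_cons, htail true _ (fun p _ => rfl)]
        simp [pvPZ, hx]
      | true =>
        -- drop-list is s :: pvPick zs false; head dropped
        simp only [pvPick, if_pos]
        have hhead : (!((s :: pvPick (pvZ t (s + 1)) false).contains s)) = false := by
          simp [List.contains_eq_mem]
        rw [if_neg (by simp)]
        have hcong : ∀ p ∈ PySem.List.enumerate t (s + 1),
            (!((s :: pvPick (pvZ t (s + 1)) false).contains p.1)) =
              (!((pvPick (pvZ t (s + 1)) false).contains p.1)) := by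
          intro p hp
          rw [PySem.List.mem_enumerate_iff] at hp
          obtain ⟨k, -, rfl⟩ := hp
          have : ¬ ((s + 1 + (k : Int), t[k]).1 = s) := by simp; omega
          simp [List.contains_eq_mem, this]
        rw [htail false _ hcong]
        simp [pvPZ, hx]
    · rw [if_neg hx]
      have hnot : ¬ s ∈ pvPick (pvZ t (s + 1)) b := fun hc => by
        have := pvZ_ge t (s + 1) s (pvPick_subset _ _ _ hc); omega
      have hhead : (!((pvPick (pvZ t (s + 1)) b).contains s)) = true := by
        simp [List.contains_eq_mem, hnot]
      rw [if_pos hhead, List.map_cons, htail b _ (fun p _ => rfl)]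
      simp [pvPZ, hx]

/-- B computes `pvPZ arr true`. -/
theorem pvB_eq (arr : List Int) : pair_zeros_alt arr = pvPZ arr true := by
  have hz : ((PySem.List.enumerate arr).filter (fun p => p.2 == 0)).map
      (fun p => p.1) = pvZ arr 0 := rfl
  unfold pair_zeros_alt
  dsimp only
  rw [pvPick_enum, hz, (by decide : (PySem.Int.mod (0 : Int) 2 == 1) = false)]
  have hcong : ∀ p ∈ PySem.List.enumerate arr 0,
      (!(PySem.Set.contains (PySem.Set.ofList (pvPick (pvZ arr 0) false)) p.1)) =
        (!((pvPick (pvZ arr 0) false).contains p.1)) := by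
    intro p _; rw [pvContains_ofList]
  rw [List.filter_congr hcong, pvB_main arr 0 false]
  rfl

/-- A-side invariant: the fold with accumulator `acc` and counter `c` appends
`pvPZ t (mod c 2 == 0)`. -/
theorem pvA_main (t : List Int) (acc : List Int) (c : Int) :
    (t.foldl
      (fun (s : List Int × Int) num =>
        if num == 0 then
          let zero_count := s.2 + 1
          if PySem.Int.mod zero_count 2 ≠ 0 then (s.1 ++ [num], zero_count)
          else (s.1, zero_count)
        else (s.1 ++ [num], s.2))
      (acc, c)).1 = acc ++ pvPZ t (PySem.Int.mod c 2 == 0) := by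
  induction t generalizing acc c with
  | nil => simp [pvPZ]
  | cons x t ih =>
    simp only [List.foldl_cons]
    by_cases hx : x = 0
    · subst hx
      simp only [BEq.rfl, if_pos]
      have hflip := pvMod_flip0 c
      cases hc : (PySem.Int.mod c 2 == 0) with
      | true =>
        rw [hc, Bool.not_true] at hflip
        have hkeep : PySem.Int.mod (c + 1) 2 ≠ 0 := by simpa using hflip
        rw [if_pos hkeep, ih, hflip]
        simp [pvPZ]
      | false =>
        rw [hc, Bool.not_false] at hflip
        have h0 : PySem.Int.mod (c + 1) 2 = 0 := by simpa using hflip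
        rw [if_neg (not_not_intro h0), ih, hflip]
        simp [pvPZ]
    · have hx' : (x == 0) = false := by simp [hx]
      rw [hx', if_neg (by simp), ih]
      simp [pvPZ, hx]

theorem pvA_eq (arr : List Int) : pair_zeros arr = pvPZ arr true := by
  unfold pair_zeros
  rw [pvA_main arr [] 0, (by decide : (PySem.Int.mod (0 : Int) 2 == 0) = true)]
  simp

-- ===== VERDICT (by name: the statement is the Claim_ definition above) =====
theorem pair_zeros_spec : Claim_equal_pair_zeros := by
  intro arr _
  unfold Spec_pair_zeros
  rw [pvA_eq, pvB_eq]
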